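-- pv_equiv track=rewrite | github.com/Kagirim/matrix-min-max-finder | main.py | max_row_min_col
-- ===== SOURCE A (Python) =====
-- def max_row_min_col(matrix):
--     # Create empty sets to store the maximum in row and minimum in column, respectively
--     max_in_row = set()  # O(1) space
--     min_in_col = set()  # O(1) space
--
--     # For each row in the matrix, find the maximum element in that row and add it to max_in_row set
--     for row in matrix:  # O(m*n) time
--         max_in_row.add(max(row))    # O(n) time
--
--     # For each column in the matrix, find the minimum element in that column and add it to min_in_col set
--     for col in range(len(matrix[0])):   # O(n) time
--         # To find the minimum element in a column, we can iterate through all rows and take the minimum value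
--         # of the element in that column using a generator expression
--         min_in_col.add(min(row[col] for row in matrix)) # O(m) time
--
--     # Return the intersection of the two sets, which contains only the elements that are in both sets
--     return max_in_row.intersection(min_in_col)  # O(min(m,n)) time, O(min(m,n)) space
-- ===== SOURCE B (Python) =====
-- def max_row_min_col(matrix):
--     # Single pass over the rows: collect row maxima and maintain a running
--     # per-column minimum, instead of re-scanning every column afterwards.
--     ncols = len(matrix[0])
--     col_min = list(matrix[0])
--     row_max = set()
--     for row in matrix:
--         row_max.add(max(row))
--         col_min = [min(col_min[j], row[j]) for j in range(ncols)]
--     return row_max & set(col_min)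
-- ===== Notes on version B (the rewrite author's own statement) =====
-- stated objective: alternative
-- what changed: A makes a row pass for maxima and then a separate column pass re-scanning all rows per column; B makes one fused pass over the rows maintaining a running per-column minimum list alongside the row-max set and intersects at the end.
import Mathlib
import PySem

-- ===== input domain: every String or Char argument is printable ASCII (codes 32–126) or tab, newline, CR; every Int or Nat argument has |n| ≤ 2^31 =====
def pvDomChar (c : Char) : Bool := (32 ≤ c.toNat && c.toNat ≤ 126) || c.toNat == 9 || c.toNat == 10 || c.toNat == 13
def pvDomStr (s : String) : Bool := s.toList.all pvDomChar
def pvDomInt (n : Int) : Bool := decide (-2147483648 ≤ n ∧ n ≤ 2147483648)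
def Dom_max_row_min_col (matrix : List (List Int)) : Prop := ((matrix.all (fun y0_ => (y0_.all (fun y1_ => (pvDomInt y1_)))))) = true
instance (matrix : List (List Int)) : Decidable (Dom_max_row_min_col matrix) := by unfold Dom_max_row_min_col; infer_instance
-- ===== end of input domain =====

-- B fuses the two passes of A into one traversal over the rows, keeping a running
-- per-column minimum list alongside the row-max set (objective: alternative decomposition).

-- ===== PORT A =====
-- two passes: a set of row maxima, then a set of column minima, then their intersection
def max_row_min_col (matrix : List (List Int)) : List Int :=
  let max_in_row : PySem.Set Int :=
    matrix.foldl (fun s row => s.add ((PySem.List.max? row (fun y => y)).getD 0)) PySem.Set.empty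
  let min_in_col : PySem.Set Int :=
    (PySem.List.pyRange 0 (((PySem.List.pyGet? matrix 0).getD []).length : Int) 1).foldl
      (fun s col =>
        s.add ((PySem.List.min? (matrix.map (fun row => PySem.List.pyGetD row col 0)) (fun y => y)).getD 0))
      PySem.Set.empty
  PySem.Set.inter max_in_row min_in_col

-- ===== PORT B =====
-- one pass: fold over the rows carrying (row-max set, running per-column minimum list)
def max_row_min_col_alt (matrix : List (List Int)) : List Int :=
  let ncols : Int := ((PySem.List.pyGet? matrix 0).getD []).length
  let st :=
    matrix.foldl
      (fun (st : PySem.Set Int × List Int) row =>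
        (st.1.add ((PySem.List.max? row (fun y => y)).getD 0),
         (PySem.List.pyRange 0 ncols 1).map
           (fun j => min (PySem.List.pyGetD st.2 j 0) (PySem.List.pyGetD row j 0))))
      (PySem.Set.empty, (PySem.List.pyGet? matrix 0).getD [])
  PySem.Set.inter st.1 (PySem.Set.ofList st.2)

-- ===== PRECONDITION & SPEC =====
-- Pre_ excludes exactly the inputs where Python A raises: the empty matrix (IndexError on
-- matrix[0]), an empty row (ValueError from max), and rows shorter than matrix[0] (IndexError).
def Pre_max_row_min_col (matrix : List (List Int)) : Prop :=
  matrix ≠ [] ∧ ∀ row ∈ matrix, row ≠ [] ∧ (matrix.headD []).length ≤ row.length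
instance (matrix : List (List Int)) : Decidable (Pre_max_row_min_col matrix) := by
  unfold Pre_max_row_min_col; infer_instance
def pvWitness_max_row_min_col : List (List Int) := [[1, 2], [3, 4]]

def Spec_max_row_min_col (matrix : List (List Int)) (out : List Int) : Prop := out = max_row_min_col_alt matrix
instance (matrix : List (List Int)) (out : List Int) : Decidable (Spec_max_row_min_col matrix out) := by unfold Spec_max_row_min_col; infer_instance

-- ===== CLAIM (what is proved, stated in full; the proofs are below) =====
def Claim_equal_max_row_min_col : Prop := ∀ (matrix : List (List Int)), Dom_max_row_min_col matrix → Pre_max_row_min_col matrix → Spec_max_row_min_col matrix (max_row_min_col matrix)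

-- ===== LEMMAS AND PROOFS =====

-- two sets with the same members intersect any set to the same list
theorem pv_inter_congr {s t t' : PySem.Set Int} (h : ∀ x, x ∈ t ↔ x ∈ t') :
    PySem.Set.inter s t = PySem.Set.inter s t' := by
  unfold PySem.Set.inter
  refine List.filter_congr (fun x _ => ?_)
  refine Bool.eq_iff_iff.mpr ?_
  simp only [PySem.Set.contains_iff, h x]

-- membership in an Int list via pyGetD at a nonnegative in-range Int index
theorem pv_mem_iff_pyGetD (l : List Int) (x : Int) :
    x ∈ l ↔ ∃ j : Int, 0 ≤ j ∧ j < (l.length : Int) ∧ PySem.List.pyGetD l j 0 = x := by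
  constructor
  · intro hx
    rcases List.mem_iff_getElem.mp hx with ⟨i, hi, hx⟩
    refine ⟨(i : Int), by positivity, by exact_mod_cast hi, ?_⟩
    rw [PySem.List.pyGetD_eq_getElem l 0 (by positivity) (by exact_mod_cast hi)]
    simpa using hx
  · rintro ⟨j, h0, h1, hx⟩
    rw [PySem.List.pyGetD_eq_getElem l 0 h0 h1] at hx
    exact hx ▸ List.getElem_mem _

-- the running-minimum fold, read at column j, is the fold of min over that column
theorem pv_cm_get (n : Int) (rest : List (List Int)) :
    ∀ (cm : List Int), cm.length = n.toNat → ∀ j : Int, 0 ≤ j → j < n →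
    PySem.List.pyGetD
      (rest.foldl
        (fun cm row => (PySem.List.pyRange 0 n 1).map
          (fun j => min (PySem.List.pyGetD cm j 0) (PySem.List.pyGetD row j 0))) cm) j 0
      = rest.foldl (fun a row => min a (PySem.List.pyGetD row j 0)) (PySem.List.pyGetD cm j 0) := by
  induction rest with
  | nil => intro cm _ j _ _; rfl
  | cons r rest ih =>
    intro cm hcm j h0 h1
    simp only [List.foldl_cons]
    rw [ih _ (by simp [PySem.List.length_pyRange_one]) j h0 h1]
    rw [PySem.List.pyGetD_map_pyRange_of_nonneg _ n j 0 h0 h1]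

-- length of the running-minimum fold
theorem pv_cm_len (n : Int) (rest : List (List Int)) :
    ∀ (cm : List Int), cm.length = n.toNat →
    (rest.foldl
      (fun cm row => (PySem.List.pyRange 0 n 1).map
        (fun j => min (PySem.List.pyGetD cm j 0) (PySem.List.pyGetD row j 0))) cm).length = n.toNat := by
  induction rest with
  | nil => intro cm hcm; exact hcm
  | cons r rest ih =>
    intro cm hcm
    simp only [List.foldl_cons]
    exact ih _ (by simp [PySem.List.length_pyRange_one])

-- ===== VERDICT (by name: the statement is the Claim_ definition above) =====
theorem max_row_min_col_spec : Claim_equal_max_row_min_col := by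
  intro matrix _ hpre
  unfold Spec_max_row_min_col max_row_min_col max_row_min_col_alt
  obtain ⟨r0, rest, rfl⟩ : ∃ r0 rest, matrix = r0 :: rest := by
    cases matrix with
    | nil => exact absurd rfl hpre.1
    | cons a l => exact ⟨a, l, rfl⟩
  simp only [PySem.List.pyGet?_zero_cons, Option.getD_some]
  rw [PySem.List.foldl_prod_mk
    (f := fun (s : PySem.Set Int) (row : List Int) => s.add ((PySem.List.max? row (fun y => y)).getD 0))
    (g := fun (cm : List Int) (row : List Int) =>
      (PySem.List.pyRange 0 ((r0.length : Int)) 1).map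
        (fun j => min (PySem.List.pyGetD cm j 0) (PySem.List.pyGetD row j 0)))]
  refine pv_inter_congr (fun x => ?_)
  simp only [PySem.Set.mem_foldl_add, PySem.Set.mem_ofList, PySem.Set.empty, List.not_mem_nil,
    false_or]
  rw [pv_mem_iff_pyGetD]
  rw [pv_cm_len (r0.length : Int) _ r0 (by simp)]
  constructor
  · rintro ⟨col, hcol, rfl⟩
    rw [PySem.List.mem_pyRange_one] at hcol
    refine ⟨col, hcol.1, by simpa using hcol.2, ?_⟩
    rw [pv_cm_get (r0.length : Int) _ r0 (by simp) col hcol.1 hcol.2]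
    simp only [List.map_cons, PySem.List.min?_id_cons, Option.getD_some, List.foldl_cons, min_self,
      List.foldl_map]
  · rintro ⟨j, h0, h1, hx⟩
    have h1' : j < (r0.length : Int) := by simpa using h1
    refine ⟨j, PySem.List.mem_pyRange_one.mpr ⟨h0, h1'⟩, ?_⟩
    rw [pv_cm_get (r0.length : Int) _ r0 (by simp) j h0 h1'] at hx
    rw [← hx]
    simp only [List.map_cons, PySem.List.min?_id_cons, Option.getD_some, List.foldl_cons, min_self,
      List.foldl_map]
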